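-- pv_equiv track=rewrite | github.com/WINDNOISE0/PythonHW | 3.4.py | find_items_backpack
-- ===== SOURCE A (Python) =====
-- def find_items_backpack(items, max_weight):
--     valid_combinations = []
--     backpack_combination = []
--
--     def backtrack(curr_weight, start_index):
--         if curr_weight > max_weight:
--             return
--
--         if curr_weight == max_weight or start_index == len(items):
--             valid_combinations.append(backpack_combination.copy())
--             return
--
--         for i in range(start_index, len(items)):
--             item, weight = items[i]
--             backpack_combination.append(item)
--             backtrack(curr_weight + weight, i + 1)
--             backpack_combination.pop()
--
--     backtrack(0, 0)
--     return valid_combinations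
--
-- items = {
--     "Sleeping bag": 2,
--     "Tent": 3,
--     "Burner": 1,
--     "Dishes": 2,
--     "Food": 4
-- }
-- ===== SOURCE B (Python) =====
-- def find_items_backpack(items, max_weight):
--     results = []
--     stack = [(0, 0, [])]
--     while stack:
--         curr_weight, start_index, partial = stack.pop()
--         if curr_weight > max_weight:
--             continue
--         if curr_weight == max_weight or start_index == len(items):
--             results.append(partial)
--             continue
--         for i in reversed(range(start_index, len(items))):
--             item, weight = items[i]
--             stack.append((curr_weight + weight, i + 1, partial + [item]))
--     return results
-- ===== Notes on version B (the rewrite author's own statement) =====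
-- stated objective: alternative
-- what changed: Replaced the recursive backtracking with an iterative DFS over an explicit stack of (weight, index, partial) frames, pushing children in reversed order to preserve A's preorder output.
import Mathlib
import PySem

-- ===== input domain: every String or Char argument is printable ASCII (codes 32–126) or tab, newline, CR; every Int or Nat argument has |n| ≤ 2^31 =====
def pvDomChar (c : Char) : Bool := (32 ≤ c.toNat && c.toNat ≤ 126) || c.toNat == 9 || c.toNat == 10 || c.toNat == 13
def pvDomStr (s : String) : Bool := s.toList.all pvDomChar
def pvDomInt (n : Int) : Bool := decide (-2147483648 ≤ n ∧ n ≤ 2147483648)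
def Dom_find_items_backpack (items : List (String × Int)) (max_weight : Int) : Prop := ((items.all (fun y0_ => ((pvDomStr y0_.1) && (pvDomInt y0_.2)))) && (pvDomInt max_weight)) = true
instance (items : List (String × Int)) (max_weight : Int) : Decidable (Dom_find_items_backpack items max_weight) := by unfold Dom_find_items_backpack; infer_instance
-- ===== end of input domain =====

-- B replaces A's recursive backtracking by an explicit-stack iterative DFS (alternative decomposition, same cost).
-- Both ports use a structural fuel parameter purely as a totality guard; the fuel given at
-- the top level is provably sufficient (the fuel-irrelevance lemmas below), so neither port
-- ever hits the fuel-exhausted branch on any input.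

-- ===== PORT A =====
-- A's nested `backtrack` (the mutable `valid_combinations` / `backpack_combination` are threaded
-- functionally: comb = current partial combination, the returned list = what this call appends).
-- The for-loop over range(start_index, len(items)) is the foldl; recursion depth is bounded by
-- items.length + 1 - start, so fuel items.length + 1 at the root is always enough.
def btA (items : List (String × Int)) (mw : Int) : Nat → List String → Int → Nat → List (List String)
  | 0, _, _, _ => []   -- never reached: fuel > items.length - start throughout
  | fuel + 1, comb, curr, start =>
    if curr > mw then []
    else if curr = mw ∨ start = items.length then [comb]
    else (List.range' start (items.length - start)).foldl
      (fun acc i => acc ++ btA items mw fuel (comb ++ [((items[i]?).getD ("", 0)).1])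
                          (curr + ((items[i]?).getD ("", 0)).2) (i + 1)) []

def find_items_backpack (items : List (String × Int)) (max_weight : Int) : List (List String) :=
  btA items max_weight (items.length + 1) [] 0 0

-- ===== PORT B =====
-- B's while-loop over the explicit stack (head of the list = top of the stack); pushing the
-- children in reversed(range(start, len)) order one by one equals prepending them in order,
-- hence the `map ++ rest`. Every index i produced is < items.length, so `getD` never defaults.
-- The number of loop iterations is bounded by 2 ^ (items.length + 1) (each popped frame with
-- start index s accounts for 2 ^ (items.length + 1 - s)), so that fuel is always enough.
def altGo (items : List (String × Int)) (mw : Int) : Nat → List (Int × Nat × List String) → List (List String) → List (List String)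
  | 0, _, acc => acc   -- never reached with the fuel given below
  | _ + 1, [], acc => acc
  | fuel + 1, (curr, start, comb) :: rest, acc =>
    if curr > mw then altGo items mw fuel rest acc
    else if curr = mw ∨ start = items.length then altGo items mw fuel rest (acc ++ [comb])
    else altGo items mw fuel
      (((List.range' start (items.length - start)).map
         (fun i => (curr + ((items[i]?).getD ("", 0)).2, i + 1, comb ++ [((items[i]?).getD ("", 0)).1]))) ++ rest)
      acc

def find_items_backpack_alt (items : List (String × Int)) (max_weight : Int) : List (List String) :=
  altGo items max_weight (2 ^ (items.length + 1)) [(0, 0, [])] []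

-- ===== PRECONDITION & SPEC =====
def Spec_find_items_backpack (items : List (String × Int)) (max_weight : Int) (out : List (List String)) : Prop := out = find_items_backpack_alt items max_weight
instance (items : List (String × Int)) (max_weight : Int) (out : List (List String)) : Decidable (Spec_find_items_backpack items max_weight out) := by unfold Spec_find_items_backpack; infer_instance

-- ===== CLAIM (what is proved, stated in full; the proofs are below) =====
def Claim_equal_find_items_backpack : Prop := ∀ (items : List (String × Int)) (max_weight : Int), Dom_find_items_backpack items max_weight → Spec_find_items_backpack items max_weight (find_items_backpack items max_weight)

-- ===== LEMMAS AND PROOFS =====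

-- the stack measure: a frame with start index s costs 2 ^ (L + 1 - s)
def pvMsum (L : Nat) (stack : List (Int × Nat × List String)) : Nat :=
  (stack.map (fun f => 2 ^ (L + 1 - f.2.1))).sum

lemma pvMsum_cons (L : Nat) (f : Int × Nat × List String) (rest : List (Int × Nat × List String)) :
    pvMsum L (f :: rest) = 2 ^ (L + 1 - f.2.1) + pvMsum L rest := by
  simp [pvMsum]

lemma pvMsum_append (L : Nat) (s t : List (Int × Nat × List String)) :
    pvMsum L (s ++ t) = pvMsum L s + pvMsum L t := by
  simp [pvMsum]

-- the children frames of a frame with start index s cost strictly less than the frame itself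
lemma pvPowSum (L : Nat) : ∀ (n s : Nat), s + n ≤ L →
    ((List.range' s n).map (fun i => 2 ^ (L + 1 - (i + 1)))).sum < 2 ^ (L + 1 - s) := by
  intro n
  induction n with
  | zero => intro s _; simp
  | succ n ih =>
    intro s h
    rw [List.range'_succ, List.map_cons, List.sum_cons]
    have h1 := ih (s + 1) (by omega)
    have e1 : L + 1 - (s + 1) = L - s := by omega
    have e2 : L + 1 - s = (L - s) + 1 := by omega
    rw [e1] at h1 ⊢
    rw [e2, pow_succ]
    omega

lemma pvChildSum (items : List (String × Int)) (curr : Int) (comb : List String) (start : Nat) :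
    pvMsum items.length
        ((List.range' start (items.length - start)).map
          (fun i => (curr + ((items[i]?).getD ("", 0)).2, i + 1, comb ++ [((items[i]?).getD ("", 0)).1])))
      < 2 ^ (items.length + 1 - start) := by
  by_cases hs : start ≤ items.length
  · have h := pvPowSum items.length (items.length - start) start (by omega)
    unfold pvMsum
    rw [List.map_map]
    simpa [Function.comp_def] using h
  · rw [show items.length - start = 0 by omega]
    simp [pvMsum]

-- btA is fuel-irrelevant once the fuel exceeds the recursion depth
lemma btA_fuel (items : List (String × Int)) (mw : Int) :
    ∀ (f1 : Nat), ∀ (f2 : Nat) (comb : List String) (curr : Int) (start : Nat),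
      items.length - start < f1 → items.length - start < f2 →
      btA items mw f1 comb curr start = btA items mw f2 comb curr start := by
  intro f1
  induction f1 with
  | zero => intro f2 comb curr start h1 _; omega
  | succ n ih =>
    intro f2 comb curr start h1 h2
    match f2 with
    | 0 => omega
    | m + 1 =>
      rw [btA, btA]
      by_cases hc : curr > mw
      · simp [hc]
      · by_cases he : curr = mw ∨ start = items.length
        · simp [hc, he]
        · simp only [if_neg hc, if_neg he]
          apply PySem.List.foldl_congr_mem
          intro acc i hi
          have hmem := List.mem_range'.mp hi
          have hiL : i < items.length := by omega
          congr 1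
          exact ih m _ _ (i + 1) (by omega) (by omega)

-- altGo is fuel-irrelevant once the fuel reaches the stack measure
lemma altGo_fuel (items : List (String × Int)) (mw : Int) :
    ∀ (f1 : Nat), ∀ (f2 : Nat) (stack : List (Int × Nat × List String)) (acc : List (List String)),
      pvMsum items.length stack ≤ f1 → pvMsum items.length stack ≤ f2 →
      altGo items mw f1 stack acc = altGo items mw f2 stack acc := by
  intro f1
  induction f1 with
  | zero =>
    intro f2 stack acc h1 _
    match stack with
    | [] => cases f2 <;> rfl
    | (curr, start, comb) :: rest =>
      exfalso
      have hcons : pvMsum items.length ((curr, start, comb) :: rest)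
          = 2 ^ (items.length + 1 - start) + pvMsum items.length rest := by simp [pvMsum]
      have hpow : 0 < 2 ^ (items.length + 1 - start) := Nat.two_pow_pos _
      omega
  | succ n ih =>
    intro f2 stack acc h1 h2
    match stack with
    | [] => cases f2 <;> rfl
    | (curr, start, comb) :: rest =>
      have hpow : 0 < 2 ^ (items.length + 1 - start) := Nat.two_pow_pos _
      have hcons : pvMsum items.length ((curr, start, comb) :: rest)
          = 2 ^ (items.length + 1 - start) + pvMsum items.length rest := by simp [pvMsum]
      match f2 with
      | 0 => exfalso; omega
      | m + 1 =>
        rw [altGo, altGo]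
        by_cases hc : curr > mw
        · simp only [if_pos hc]
          exact ih m rest acc (by omega) (by omega)
        · by_cases he : curr = mw ∨ start = items.length
          · simp only [if_neg hc, if_pos he]
            exact ih m rest (acc ++ [comb]) (by omega) (by omega)
          · simp only [if_neg hc, if_neg he]
            have hcs := pvChildSum items curr comb start
            have happ := pvMsum_append items.length
              ((List.range' start (items.length - start)).map
                (fun i => (curr + ((items[i]?).getD ("", 0)).2, i + 1, comb ++ [((items[i]?).getD ("", 0)).1]))) rest
            exact ih m _ acc (by omega) (by omega)

-- processing one frame of the stack produces exactly the combinations A's backtrack call yields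
lemma altGo_frame (items : List (String × Int)) (mw : Int) :
    ∀ (d : Nat), ∀ (curr : Int) (start : Nat) (comb : List String)
      (rest : List (Int × Nat × List String)) (acc : List (List String)) (fB : Nat),
      items.length + 1 - start ≤ d →
      pvMsum items.length ((curr, start, comb) :: rest) ≤ fB →
      altGo items mw fB ((curr, start, comb) :: rest) acc
        = altGo items mw fB rest (acc ++ btA items mw (items.length + 1) comb curr start) := by
  intro d
  induction d using Nat.strong_induction_on with
  | _ d ih =>
    intro curr start comb rest acc fB hd hf
    have hpow : 0 < 2 ^ (items.length + 1 - start) := Nat.two_pow_pos _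
    have hcons : pvMsum items.length ((curr, start, comb) :: rest)
        = 2 ^ (items.length + 1 - start) + pvMsum items.length rest := by simp [pvMsum]
    match fB with
    | 0 => exfalso; omega
    | f + 1 =>
      rw [altGo, btA]
      by_cases hc : curr > mw
      · simp only [if_pos hc, List.append_nil]
        exact altGo_fuel items mw f (f + 1) rest acc (by omega) (by omega)
      · by_cases he : curr = mw ∨ start = items.length
        · simp only [if_neg hc, if_pos he]
          exact altGo_fuel items mw f (f + 1) rest (acc ++ [comb]) (by omega) (by omega)
        · simp only [if_neg hc, if_neg he]
          -- A's inner for-loop, as a flatMap over the remaining indices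
          rw [PySem.List.foldl_append_eq_flatMap]
          rw [List.nil_append]
          have hcs := pvChildSum items curr comb start
          have happ := pvMsum_append items.length
            ((List.range' start (items.length - start)).map
              (fun i => (curr + ((items[i]?).getD ("", 0)).2, i + 1, comb ++ [((items[i]?).getD ("", 0)).1]))) rest
          rw [altGo_fuel items mw f (f + 1) _ acc (by omega) (by omega)]
          by_cases hsL : start ≤ items.length
          · have aux : ∀ (cnt : Nat), ∀ (i : Nat) (acc2 : List (List String)),
                i + cnt = items.length → start ≤ i →
                pvMsum items.length
                  (((List.range' i cnt).map
                    (fun j => (curr + ((items[j]?).getD ("", 0)).2, j + 1, comb ++ [((items[j]?).getD ("", 0)).1]))) ++ rest) ≤ f + 1 →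
                altGo items mw (f + 1)
                  (((List.range' i cnt).map
                    (fun j => (curr + ((items[j]?).getD ("", 0)).2, j + 1, comb ++ [((items[j]?).getD ("", 0)).1]))) ++ rest) acc2
                  = altGo items mw (f + 1) rest
                      (acc2 ++ (List.range' i cnt).flatMap
                        (fun i => btA items mw items.length (comb ++ [((items[i]?).getD ("", 0)).1])
                                    (curr + ((items[i]?).getD ("", 0)).2) (i + 1))) := by
              intro cnt
              induction cnt with
              | zero => intro i acc2 hi hsi hm; simp
              | succ n ihn =>
                intro i acc2 hi hsi hm
                have hiL : i < items.length := by omega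
                rw [List.range'_succ, List.map_cons, List.cons_append] at hm ⊢
                rw [List.flatMap_cons]
                have hmc : pvMsum items.length
                      ((curr + ((items[i]?).getD ("", 0)).2, i + 1, comb ++ [((items[i]?).getD ("", 0)).1]) ::
                        (((List.range' (i + 1) n).map
                          (fun j => (curr + ((items[j]?).getD ("", 0)).2, j + 1, comb ++ [((items[j]?).getD ("", 0)).1]))) ++ rest))
                    = 2 ^ (items.length + 1 - (i + 1)) + pvMsum items.length
                        (((List.range' (i + 1) n).map
                          (fun j => (curr + ((items[j]?).getD ("", 0)).2, j + 1, comb ++ [((items[j]?).getD ("", 0)).1]))) ++ rest) :=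
                  pvMsum_cons items.length _ _
                have hpow2 : 0 < 2 ^ (items.length + 1 - (i + 1)) := Nat.two_pow_pos _
                rw [ih (items.length - i) (by omega) _ _ _ _ _ (f + 1) (by omega) hm]
                rw [ihn (i + 1) _ (by omega) (by omega) (by omega)]
                rw [btA_fuel items mw items.length (items.length + 1) _ _ (i + 1) (by omega) (by omega)]
                simp [List.append_assoc]
            refine aux (items.length - start) start acc (by omega) (Nat.le_refl _) (by omega)
          · rw [show items.length - start = 0 by omega]
            simp

-- ===== VERDICT (by name: the statement is the Claim_ definition above) =====
theorem find_items_backpack_spec : Claim_equal_find_items_backpack := by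
  intro items mw _
  unfold Spec_find_items_backpack find_items_backpack find_items_backpack_alt
  rw [altGo_frame items mw (items.length + 1) 0 0 [] [] [] (2 ^ (items.length + 1))
      (by omega) (by simp [pvMsum])]
  cases h : 2 ^ (items.length + 1) with
  | zero => exact absurd h (by positivity)
  | succ n => simp [altGo]
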